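-- pv_equiv track=rewrite | github.com/LambertAlpha/garden-of-peony-pavilion | structures/pond_island.py | _hex_outline
-- ===== SOURCE A (Python) =====
-- def _hex_footprint(cx, cz):
--     """六角形（切角矩形）：9×9 正方形切去四角 2×2。
--     返回 set of (x, z)。
--     布局（相对于中心）:
--        XXXXX      <- dz=-4: dx in [-2..2]
--       XXXXXXX     <- dz=-3: dx in [-3..3]
--      XXXXXXXXX    <- dz=-2..-1,0,1,2: dx in [-4..4]
--       XXXXXXX     <- dz=3: dx in [-3..3]
--        XXXXX      <- dz=4: dx in [-2..2]
--     """
--     footprint = set()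
--     for dz in range(-4, 5):
--         if abs(dz) == 4:
--             r = 2
--         elif abs(dz) == 3:
--             r = 3
--         else:
--             r = 4
--         for dx in range(-r, r + 1):
--             footprint.add((cx + dx, cz + dz))
--     return footprint
--
-- def _hex_outline(cx, cz):
--     """六角形轮廓（边缘一圈）"""
--     full = _hex_footprint(cx, cz)
--     inner = set()
--     for (x, z) in full:
--         is_edge = False
--         for nx, nz in [(x+1,z),(x-1,z),(x,z+1),(x,z-1)]:
--             if (nx, nz) not in full:
--                 is_edge = True
--                 break
--         if not is_edge:
--             inner.add((x, z))
--     return full - inner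
-- ===== SOURCE B (Python) =====
-- def _hex_outline(cx, cz):
--     """Edge ring of the hexagonal footprint, derived from per-row widths:
--     a cell is on the outline iff it is at its row's end or wider than an
--     adjacent row (missing rows count as width -1). No footprint set is built."""
--     def radius(dz):
--         if dz < -4 or dz > 4:
--             return -1
--         a = abs(dz)
--         if a == 4:
--             return 2
--         if a == 3:
--             return 3
--         return 4
--     out = set()
--     for dz in range(-4, 5):
--         r = radius(dz)
--         for dx in range(-r, r + 1):
--             if dx == -r or dx == r or abs(dx) > radius(dz - 1) or abs(dx) > radius(dz + 1):
--                 out.add((cx + dx, cz + dz))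
--     return out
-- ===== Notes on version B (the rewrite author's own statement) =====
-- stated objective: alternative
-- what changed: B computes the edge ring directly from per-row width comparisons (a cell is on the outline iff it is at its row's end or sticks out past an adjacent row), instead of building the full footprint set and membership-testing the four neighbours of every cell.
import Mathlib
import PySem

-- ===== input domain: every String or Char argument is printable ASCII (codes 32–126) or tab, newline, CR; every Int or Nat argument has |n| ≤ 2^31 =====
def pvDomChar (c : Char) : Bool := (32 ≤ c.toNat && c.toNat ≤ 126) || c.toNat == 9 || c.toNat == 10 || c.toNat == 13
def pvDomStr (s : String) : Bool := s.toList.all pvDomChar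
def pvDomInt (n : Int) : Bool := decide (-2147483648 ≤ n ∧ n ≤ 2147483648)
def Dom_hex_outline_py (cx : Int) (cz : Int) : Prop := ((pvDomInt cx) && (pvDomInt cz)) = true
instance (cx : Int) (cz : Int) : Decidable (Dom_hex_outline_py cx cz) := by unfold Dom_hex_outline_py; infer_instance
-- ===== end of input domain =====

-- B derives the outline directly from per-row width comparisons instead of building
-- the full footprint set and membership-testing the four neighbours of every cell.
-- Both Pythons return a set; the ports fix the insertion-order listing, and equality
-- is proved at the list level.

-- ===== PORT A =====
-- literal port of _hex_footprint
def hex_footprint_py (cx : Int) (cz : Int) : PySem.Set (Int × Int) :=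
  (PySem.List.pyRange (-4) 5 1).foldl (fun fp dz =>
    let r : Int := if dz.natAbs == 4 then 2 else if dz.natAbs == 3 then 3 else 4
    (PySem.List.pyRange (-r) (r + 1) 1).foldl
      (fun fp2 dx => PySem.Set.add fp2 (cx + dx, cz + dz)) fp)
    PySem.Set.empty

-- literal port of _hex_outline (the neighbour loop with break = List.any)
def hex_outline_py (cx : Int) (cz : Int) : List (Int × Int) :=
  let full := hex_footprint_py cx cz
  let inner := full.foldl (fun inn p =>
    let isEdge := [(p.1 + 1, p.2), (p.1 - 1, p.2), (p.1, p.2 + 1), (p.1, p.2 - 1)].any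
      (fun n => !(PySem.Set.contains full n))
    if isEdge then inn else PySem.Set.add inn p) PySem.Set.empty
  PySem.Set.diff full inner

-- ===== PORT B =====
-- row half-width; rows outside [-4,4] are absent (radius -1)
def hexRadiusB (dz : Int) : Int :=
  if dz < -4 ∨ dz > 4 then -1
  else if dz.natAbs == 4 then 2 else if dz.natAbs == 3 then 3 else 4

def hex_outline_py_alt (cx : Int) (cz : Int) : List (Int × Int) :=
  (PySem.List.pyRange (-4) 5 1).foldl (fun out dz =>
    let r := hexRadiusB dz
    (PySem.List.pyRange (-r) (r + 1) 1).foldl (fun out2 dx =>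
      if dx == -r || dx == r || (dx.natAbs : Int) > hexRadiusB (dz - 1)
          || (dx.natAbs : Int) > hexRadiusB (dz + 1)
      then PySem.Set.add out2 (cx + dx, cz + dz) else out2) out)
    PySem.Set.empty

-- ===== PRECONDITION & SPEC =====
def Spec_hex_outline_py (cx : Int) (cz : Int) (out : List (Int × Int)) : Prop := out = hex_outline_py_alt cx cz
instance (cx : Int) (cz : Int) (out : List (Int × Int)) : Decidable (Spec_hex_outline_py cx cz out) := by unfold Spec_hex_outline_py; infer_instance

-- ===== CLAIM (what is proved, stated in full; the proofs are below) =====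
def Claim_equal_hex_outline_py : Prop := ∀ (cx : Int) (cz : Int), Dom_hex_outline_py cx cz → Spec_hex_outline_py cx cz (hex_outline_py cx cz)

-- ===== LEMMAS AND PROOFS =====

-- translation of a cell by the centre
def pvShift (cx cz : Int) (p : Int × Int) : Int × Int := (cx + p.1, cz + p.2)

lemma mem_map_shift (cx cz a b : Int) (s : List (Int × Int)) :
    ((cx + a, cz + b) ∈ s.map (pvShift cx cz)) ↔ (a, b) ∈ s := by
  constructor
  · intro h
    obtain ⟨⟨x, y⟩, hm, he⟩ := List.mem_map.1 h
    simp only [pvShift, Prod.mk.injEq] at he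
    obtain ⟨h1, h2⟩ := he
    have hx : x = a := by omega
    have hy : y = b := by omega
    subst hx; subst hy; exact hm
  · intro h
    exact List.mem_map.2 ⟨(a, b), h, rfl⟩

lemma contains_map_shift (cx cz x y : Int) (s : List (Int × Int)) :
    PySem.Set.contains (s.map (pvShift cx cz)) (cx + x, cz + y) = PySem.Set.contains s (x, y) := by
  simp only [PySem.Set.contains]
  have h1 : ∀ (t : List (Int × Int)) (p : Int × Int), List.contains t p = decide (p ∈ t) := by
    intro t p
    by_cases h : p ∈ t <;> simp [h]
  rw [h1, h1, decide_eq_decide]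
  exact mem_map_shift cx cz x y s

lemma add_map_shift (cx cz a b : Int) (s : List (Int × Int)) :
    PySem.Set.add (s.map (pvShift cx cz)) (cx + a, cz + b)
      = (PySem.Set.add s (a, b)).map (pvShift cx cz) := by
  rw [PySem.Set.add_eq_ite, PySem.Set.add_eq_ite]
  by_cases h : (a, b) ∈ s
  · rw [if_pos ((mem_map_shift cx cz a b s).2 h), if_pos h]
  · rw [if_neg (fun hc => h ((mem_map_shift cx cz a b s).1 hc)), if_neg h, List.map_append]
    rfl

-- footprint base offsets (proof helper)
def pvFootBase : List (Int × Int) :=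
  (PySem.List.pyRange (-4) 5 1).foldl (fun fp dz =>
    let r : Int := if dz.natAbs == 4 then 2 else if dz.natAbs == 3 then 3 else 4
    (PySem.List.pyRange (-r) (r + 1) 1).foldl
      (fun fp2 dx => PySem.Set.add fp2 (dx, dz)) fp) []

lemma rowA_shift (cx cz dz : Int) (xs : List Int) (s : List (Int × Int)) :
    xs.foldl (fun fp dx => PySem.Set.add fp (cx + dx, cz + dz)) (s.map (pvShift cx cz))
      = (xs.foldl (fun fp dx => PySem.Set.add fp (dx, dz)) s).map (pvShift cx cz) := by
  induction xs generalizing s with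
  | nil => rfl
  | cons x t ih =>
      simp only [List.foldl_cons, add_map_shift]
      exact ih _

lemma outerA_shift (cx cz : Int) (zs : List Int) (s : List (Int × Int)) :
    zs.foldl (fun fp dz =>
        let r : Int := if dz.natAbs == 4 then 2 else if dz.natAbs == 3 then 3 else 4
        (PySem.List.pyRange (-r) (r + 1) 1).foldl
          (fun fp2 dx => PySem.Set.add fp2 (cx + dx, cz + dz)) fp) (s.map (pvShift cx cz))
      = (zs.foldl (fun fp dz =>
          let r : Int := if dz.natAbs == 4 then 2 else if dz.natAbs == 3 then 3 else 4
          (PySem.List.pyRange (-r) (r + 1) 1).foldl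
            (fun fp2 dx => PySem.Set.add fp2 (dx, dz)) fp) s).map (pvShift cx cz) := by
  induction zs generalizing s with
  | nil => rfl
  | cons z t ih =>
      simp only [List.foldl_cons, rowA_shift]
      exact ih _

lemma foot_shift (cx cz : Int) :
    hex_footprint_py cx cz = pvFootBase.map (pvShift cx cz) := by
  have h := outerA_shift cx cz (PySem.List.pyRange (-4) 5 1) []
  simpa [hex_footprint_py, pvFootBase, PySem.Set.empty] using h

-- base-level edge test (proof helper)
def pvEdge (base : List (Int × Int)) (q : Int × Int) : Bool :=
  [(q.1 + 1, q.2), (q.1 - 1, q.2), (q.1, q.2 + 1), (q.1, q.2 - 1)].any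
    (fun n => !(PySem.Set.contains base n))

lemma edge_shift (cx cz : Int) (base : List (Int × Int)) (q : Int × Int) :
    ([((pvShift cx cz q).1 + 1, (pvShift cx cz q).2),
      ((pvShift cx cz q).1 - 1, (pvShift cx cz q).2),
      ((pvShift cx cz q).1, (pvShift cx cz q).2 + 1),
      ((pvShift cx cz q).1, (pvShift cx cz q).2 - 1)].any
        (fun n => !(PySem.Set.contains (base.map (pvShift cx cz)) n)))
      = pvEdge base q := by
  obtain ⟨a, b⟩ := q
  have e1 : cx + a + 1 = cx + (a + 1) := by ring
  have e2 : cx + a - 1 = cx + (a - 1) := by ring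
  have e3 : cz + b + 1 = cz + (b + 1) := by ring
  have e4 : cz + b - 1 = cz + (b - 1) := by ring
  simp only [pvShift, pvEdge, List.any_cons, List.any_nil, e1, e2, e3, e4,
    contains_map_shift]

lemma innerA_shift (cx cz : Int) (base : List (Int × Int)) (l s : List (Int × Int)) :
    l.foldl (fun inn q => if pvEdge base q then inn else PySem.Set.add inn (pvShift cx cz q))
        (s.map (pvShift cx cz))
      = (l.foldl (fun inn q => if pvEdge base q then inn else PySem.Set.add inn q) s).map
          (pvShift cx cz) := by
  induction l generalizing s with
  | nil => rfl
  | cons q t ih =>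
      simp only [List.foldl_cons]
      by_cases h : pvEdge base q
      · rw [if_pos h, if_pos h]; exact ih s
      · rw [if_neg h, if_neg h]
        have hadd : PySem.Set.add (s.map (pvShift cx cz)) (pvShift cx cz q)
            = (PySem.Set.add s q).map (pvShift cx cz) := by
          obtain ⟨a, b⟩ := q
          exact add_map_shift cx cz a b s
        rw [hadd]; exact ih _

lemma diff_map_shift (cx cz : Int) (s t : List (Int × Int)) :
    PySem.Set.diff (s.map (pvShift cx cz)) (t.map (pvShift cx cz))
      = (PySem.Set.diff s t).map (pvShift cx cz) := by
  simp only [PySem.Set.diff]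
  rw [List.filter_map]
  congr 1
  apply List.filter_congr
  intro q _
  obtain ⟨a, b⟩ := q
  simp only [Function.comp, pvShift, contains_map_shift]

def pvInnerBase : List (Int × Int) :=
  pvFootBase.foldl (fun inn q => if pvEdge pvFootBase q then inn else PySem.Set.add inn q) []

def pvOutBaseA : List (Int × Int) := PySem.Set.diff pvFootBase pvInnerBase

lemma A_repr (cx cz : Int) :
    hex_outline_py cx cz = pvOutBaseA.map (pvShift cx cz) := by
  have h := innerA_shift cx cz pvFootBase pvFootBase []
  simp only [List.map_nil] at h
  unfold hex_outline_py pvOutBaseA pvInnerBase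
  simp only [foot_shift, PySem.Set.empty, List.foldl_map, edge_shift]
  rw [h, diff_map_shift]

-- B side
lemma rowB_shift (cx cz dz r : Int) (xs : List Int) (s : List (Int × Int)) :
    xs.foldl (fun out dx =>
        if dx == -r || dx == r || (dx.natAbs : Int) > hexRadiusB (dz - 1)
            || (dx.natAbs : Int) > hexRadiusB (dz + 1)
        then PySem.Set.add out (cx + dx, cz + dz) else out) (s.map (pvShift cx cz))
      = (xs.foldl (fun out dx =>
          if dx == -r || dx == r || (dx.natAbs : Int) > hexRadiusB (dz - 1)
              || (dx.natAbs : Int) > hexRadiusB (dz + 1)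
          then PySem.Set.add out (dx, dz) else out) s).map (pvShift cx cz) := by
  induction xs generalizing s with
  | nil => rfl
  | cons x t ih =>
      simp only [List.foldl_cons]
      by_cases h : (x == -r || x == r || (x.natAbs : Int) > hexRadiusB (dz - 1)
          || (x.natAbs : Int) > hexRadiusB (dz + 1)) = true
      · rw [if_pos h, if_pos h, add_map_shift]; exact ih _
      · rw [if_neg h, if_neg h]; exact ih s

lemma outerB_shift (cx cz : Int) (zs : List Int) (s : List (Int × Int)) :
    zs.foldl (fun out dz =>
        let r := hexRadiusB dz
        (PySem.List.pyRange (-r) (r + 1) 1).foldl (fun out2 dx =>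
          if dx == -r || dx == r || (dx.natAbs : Int) > hexRadiusB (dz - 1)
              || (dx.natAbs : Int) > hexRadiusB (dz + 1)
          then PySem.Set.add out2 (cx + dx, cz + dz) else out2) out) (s.map (pvShift cx cz))
      = (zs.foldl (fun out dz =>
          let r := hexRadiusB dz
          (PySem.List.pyRange (-r) (r + 1) 1).foldl (fun out2 dx =>
            if dx == -r || dx == r || (dx.natAbs : Int) > hexRadiusB (dz - 1)
                || (dx.natAbs : Int) > hexRadiusB (dz + 1)
            then PySem.Set.add out2 (dx, dz) else out2) out) s).map (pvShift cx cz) := by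
  induction zs generalizing s with
  | nil => rfl
  | cons z t ih =>
      simp only [List.foldl_cons, rowB_shift]
      exact ih _

def pvOutBaseB : List (Int × Int) :=
  (PySem.List.pyRange (-4) 5 1).foldl (fun out dz =>
    let r := hexRadiusB dz
    (PySem.List.pyRange (-r) (r + 1) 1).foldl (fun out2 dx =>
      if dx == -r || dx == r || (dx.natAbs : Int) > hexRadiusB (dz - 1)
          || (dx.natAbs : Int) > hexRadiusB (dz + 1)
      then PySem.Set.add out2 (dx, dz) else out2) out) []

lemma B_repr (cx cz : Int) :
    hex_outline_py_alt cx cz = pvOutBaseB.map (pvShift cx cz) := by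
  have h := outerB_shift cx cz (PySem.List.pyRange (-4) 5 1) []
  simpa [hex_outline_py_alt, pvOutBaseB, PySem.Set.empty] using h

set_option maxRecDepth 8192 in
lemma base_eq : pvOutBaseA = pvOutBaseB := by decide

-- ===== VERDICT (by name: the statement is the Claim_ definition above) =====
theorem hex_outline_py_spec : Claim_equal_hex_outline_py := by
  intro cx cz _
  unfold Spec_hex_outline_py
  rw [A_repr, B_repr, base_eq]
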